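-- pv_equiv track=rewrite | github.com/eladb3/seq2seq_coref | DataAugmentation/data_aug.py | split2sentences
-- ===== SOURCE A (Python) =====
-- def split2sentences(examples, max_sentences=10):
--     examples_out = []
--     for idx, (doc_key, input_words, clusters, speakers) in enumerate(examples):
--
--         end_indices = [i for i, word in enumerate(input_words) if word == '.']
--         start_indices = [-1] + end_indices[:-1]
--         indices = list(zip(start_indices, end_indices))
--         split_indices = [indices[i:i + max_sentences] for i in list(range(0,len(indices),max_sentences))]
--         for split_idx, split  in enumerate(split_indices):
--             start, end = zip(*split)
--             start, end = min(start), max(end)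
--             start += 1 # start after '.'
--             end += 1 # include '.' in sentence
--             _input_words = input_words[start:end]
--             _doc_key = f'{doc_key}_split_{split_idx}_start_{start}_end_{end}'
--             _speakers = speakers[start:end]
--             _clusters = filter_clusters(clusters, start, end)
--             examples_out.append((_doc_key, _input_words, _clusters, _speakers))
--     return examples_out
--
-- def filter_clusters(clusters, start, end):
--     ret = []
--     for cluster in clusters:
--         new_cluster = []
--         length = len(range(start,end))
--         for x,y in cluster:
--             if x not in range(start, end): continue
--             x, y = map(lambda t: min(t-start, length-1), (x,y))
--             new_cluster.append([x, y])
--         if len(new_cluster) > 1: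
--             ret.append(new_cluster)
--     return ret
-- ===== SOURCE B (Python) =====
-- def split2sentences(examples, max_sentences=10):
--     examples_out = []
--     if max_sentences < 1:
--         return examples_out
--     for doc_key, input_words, clusters, speakers in examples:
--         start, count, split_idx, end = 0, 0, 0, 0
--         for i, w in enumerate(input_words):
--             if w == '.':
--                 count += 1
--                 end = i + 1
--                 if count == max_sentences:
--                     examples_out.append(_make_chunk(doc_key, input_words, clusters,
--                                                     speakers, split_idx, start, end))
--                     start, count, split_idx = end, 0, split_idx + 1
--         if count > 0:
--             examples_out.append(_make_chunk(doc_key, input_words, clusters,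
--                                             speakers, split_idx, start, end))
--     return examples_out
--
-- def _make_chunk(doc_key, words, clusters, speakers, split_idx, start, end):
--     length = end - start
--     new_clusters = []
--     for cluster in clusters:
--         nc = [[min(x - start, length - 1), min(y - start, length - 1)]
--               for x, y in cluster if start <= x < end]
--         if len(nc) > 1:
--             new_clusters.append(nc)
--     return (f'{doc_key}_split_{split_idx}_start_{start}_end_{end}',
--             words[start:end], new_clusters, speakers[start:end])
-- ===== Notes on version B (the rewrite author's own statement) =====
-- stated objective: alternative
-- what changed: B replaces A's staged index pipeline (build the period-position list, pair it with shifted starts, chunk the pairs by slicing, recover each chunk's bounds with zip(*)+min/max) by a single streaming pass over the words with an accumulator (start, sentence count, split index, last period end) that emits a chunk the moment the sentence count reaches max_sentences, plus a final flush of the partial last chunk.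
import Mathlib
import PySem

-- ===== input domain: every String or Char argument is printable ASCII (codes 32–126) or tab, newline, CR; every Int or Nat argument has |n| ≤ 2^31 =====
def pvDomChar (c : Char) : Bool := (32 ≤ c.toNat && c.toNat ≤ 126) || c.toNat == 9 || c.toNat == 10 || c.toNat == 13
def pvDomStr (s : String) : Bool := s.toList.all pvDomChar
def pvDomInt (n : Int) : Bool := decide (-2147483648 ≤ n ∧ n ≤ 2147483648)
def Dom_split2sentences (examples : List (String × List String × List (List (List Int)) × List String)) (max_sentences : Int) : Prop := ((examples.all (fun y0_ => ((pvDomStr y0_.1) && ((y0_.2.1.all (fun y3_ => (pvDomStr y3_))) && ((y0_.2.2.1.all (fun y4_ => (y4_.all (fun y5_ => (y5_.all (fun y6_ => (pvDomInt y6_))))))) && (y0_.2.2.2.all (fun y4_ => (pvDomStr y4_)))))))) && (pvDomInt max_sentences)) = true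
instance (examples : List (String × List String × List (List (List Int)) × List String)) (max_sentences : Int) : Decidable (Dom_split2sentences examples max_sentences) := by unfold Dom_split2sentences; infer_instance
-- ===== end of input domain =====

-- B replaces A's staged index pipeline (period list, shifted-start pairs, chunking by
-- slices, zip(*)+min/max per chunk) with one streaming pass over the words that emits a
-- chunk whenever the sentence count reaches max_sentences (objective: alternative).

-- ===== PORT A =====
-- f'{doc_key}_split_{i}_start_{s}_end_{e}' (both Pythons build this same string)
def pvDocKey (dk : String) (i s e : Int) : String :=
  String.ofList (dk.toList ++ "_split_".toList ++ PySem.Int.toChars i ++ "_start_".toList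
    ++ PySem.Int.toChars s ++ "_end_".toList ++ PySem.Int.toChars e)

-- port of A's helper filter_clusters, step for step
def pvFilterClusters (clusters : List (List (List Int))) (start fin : Int) : List (List (List Int)) :=
  clusters.foldl (fun ret cluster =>
    let length : Int := max (fin - start) 0        -- len(range(start, end))
    let new_cluster : List (List Int) := cluster.foldl (fun nc p =>
      match p with
      | [x, y] =>
          if start ≤ x ∧ x < fin then               -- x in range(start, end), step 1
            nc ++ [[min (x - start) (length - 1), min (y - start) (length - 1)]]
          else nc
      | _ => nc                                     -- Python raises ValueError; excluded by Pre_
      ) []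
    if new_cluster.length > 1 then ret ++ [new_cluster] else ret) []

def split2sentences (examples : List (String × List String × List (List (List Int)) × List String)) (max_sentences : Int) : List (String × List String × List (List (List Int)) × List String) :=
  (PySem.List.enumerate examples).foldl (fun examples_out ie =>
    let doc_key := ie.2.1
    let input_words := ie.2.2.1
    let clusters := ie.2.2.2.1
    let speakers := ie.2.2.2.2
    let end_indices : List Int := (PySem.List.enumerate input_words).foldl
      (fun acc iw => if iw.2 == "." then acc ++ [iw.1] else acc) []
    let start_indices : List Int := [-1] ++ PySem.List.slice end_indices none (some (-1))
    let indices := start_indices.zip end_indices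
    let split_indices := (PySem.List.pyRange 0 (indices.length : Int) max_sentences).map
      (fun i => PySem.List.slice indices (some i) (some (i + max_sentences)))
    (PySem.List.enumerate split_indices).foldl (fun out isplit =>
      let starts := isplit.2.map Prod.fst
      let ends := isplit.2.map Prod.snd
      -- split is nonempty whenever this loop body runs, so min/max never see []
      let start := (PySem.List.min? starts (fun x => x)).getD 0 + 1
      let fin := (PySem.List.max? ends (fun x => x)).getD 0 + 1
      out ++ [(pvDocKey doc_key isplit.1 start fin,
               PySem.List.slice input_words (some start) (some fin),
               pvFilterClusters clusters start fin,
               PySem.List.slice speakers (some start) (some fin))]) examples_out) []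

-- ===== PORT B =====
-- Source B's helper _make_chunk, step for step
def pvMakeChunk (dk : String) (ws : List String) (cl : List (List (List Int))) (sp : List String)
    (split_idx start fin : Int) : String × List String × List (List (List Int)) × List String :=
  let length := fin - start
  let new_clusters := cl.foldl (fun ncs cluster =>
    let nc : List (List Int) := cluster.filterMap (fun p =>
      match p with
      | [x, y] =>
          if start ≤ x ∧ x < fin then
            some [min (x - start) (length - 1), min (y - start) (length - 1)]
          else none
      | _ => none)                                  -- Python raises ValueError; excluded by Pre_
    if nc.length > 1 then ncs ++ [nc] else ncs) []
  (pvDocKey dk split_idx start fin,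
   PySem.List.slice ws (some start) (some fin),
   new_clusters,
   PySem.List.slice sp (some start) (some fin))

-- streaming pass: state = (start, count, split_idx, end, examples_out)
def split2sentences_alt (examples : List (String × List String × List (List (List Int)) × List String)) (max_sentences : Int) : List (String × List String × List (List (List Int)) × List String) :=
  if max_sentences < 1 then [] else
  examples.foldl (fun examples_out ex =>
    let dk := ex.1
    let ws := ex.2.1
    let cl := ex.2.2.1
    let sp := ex.2.2.2
    let st := (PySem.List.enumerate ws).foldl
      (fun (st : Int × Int × Int × Int × List (String × List String × List (List (List Int)) × List String)) iw =>
        if iw.2 == "." then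
          let count := st.2.1 + 1
          let endv := iw.1 + 1
          if count = max_sentences then
            (endv, 0, st.2.2.1 + 1, endv,
             st.2.2.2.2 ++ [pvMakeChunk dk ws cl sp st.2.2.1 st.1 endv])
          else (st.1, count, st.2.2.1, endv, st.2.2.2.2)
        else st) (0, 0, 0, 0, examples_out)
    if st.2.1 > 0 then st.2.2.2.2 ++ [pvMakeChunk dk ws cl sp st.2.2.1 st.1 st.2.2.2.1]
    else st.2.2.2.2) []

-- ===== PRECONDITION & SPEC =====
-- Pre_ excludes exactly the inputs where Python A raises: max_sentences = 0 with a
-- nonempty example list (ValueError from range step 0), and, when a chunk is actually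
-- produced (max_sentences > 0 and a '.' in the document), any cluster pair that is not
-- a 2-element list (ValueError from unpacking).
def Pre_split2sentences (examples : List (String × List String × List (List (List Int)) × List String)) (max_sentences : Int) : Prop :=
  (examples = [] ∨ max_sentences ≠ 0) ∧
  ∀ e ∈ examples, (0 < max_sentences ∧ "." ∈ e.2.1) →
    ∀ c ∈ e.2.2.1, ∀ p ∈ c, p.length = 2
instance (examples : List (String × List String × List (List (List Int)) × List String)) (max_sentences : Int) : Decidable (Pre_split2sentences examples max_sentences) := by unfold Pre_split2sentences; infer_instance

def pvWitness_split2sentences : (List (String × List String × List (List (List Int)) × List String)) × Int :=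
  ([("d", ["a", ".", "b", "."], [[[0, 1], [3, 3]]], ["s", "s", "t", "t"])], 1)

def Spec_split2sentences (examples : List (String × List String × List (List (List Int)) × List String)) (max_sentences : Int) (out : List (String × List String × List (List (List Int)) × List String)) : Prop := out = split2sentences_alt examples max_sentences
instance (examples : List (String × List String × List (List (List Int)) × List String)) (max_sentences : Int) (out : List (String × List String × List (List (List Int)) × List String)) : Decidable (Spec_split2sentences examples max_sentences out) := by
  unfold Spec_split2sentences
  haveI : DecidableEq (List String × List (List (List Int)) × List String) := instDecidableEqProd
  haveI : DecidableEq (String × List String × List (List (List Int)) × List String) := instDecidableEqProd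
  infer_instance

-- ===== CLAIM (what is proved, stated in full; the proofs are below) =====
def Claim_equal_split2sentences : Prop := ∀ (examples : List (String × List String × List (List (List Int)) × List String)) (max_sentences : Int), Dom_split2sentences examples max_sentences → Pre_split2sentences examples max_sentences → Spec_split2sentences examples max_sentences (split2sentences examples max_sentences)

-- ===== LEMMAS AND PROOFS =====

-- range(0, b, m) is empty for a negative step and b ≥ 0
theorem pv_pyRange_neg_nil (b m : Int) (hm : m < 0) (hb : 0 ≤ b) :
    PySem.List.pyRange 0 b m = [] := by
  unfold PySem.List.pyRange
  split <;> rename_i h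
  · omega
  · split <;> rename_i h2
    · omega
    · simp only
      have : ¬ (b < 0) := by omega
      simp [this]

-- range(a, b, m) for positive m is empty once b ≤ a
theorem pv_pyRange_pos_nil (a b m : Int) (hm : 0 < m) (hb : b ≤ a) :
    PySem.List.pyRange a b m = [] := by
  rw [PySem.List.pyRange_of_pos a b hm]
  have : ¬ (a < b) := by omega
  simp [this]

-- range(a, b, m) for positive m and a < b starts with a
theorem pv_pyRange_pos_cons (a b m : Int) (hm : 0 < m) (hab : a < b) :
    PySem.List.pyRange a b m = a :: PySem.List.pyRange (a + m) b m := by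
  rw [PySem.List.pyRange_of_pos a b hm, PySem.List.pyRange_of_pos (a + m) b hm]
  by_cases h2 : a + m < b
  · have hq : (b - a + m - 1) / m = (b - (a + m) + m - 1) / m + 1 := by
      have := Int.add_mul_ediv_right (b - (a + m) + m - 1) 1 (by omega : m ≠ 0)
      have harg : b - a + m - 1 = b - (a + m) + m - 1 + 1 * m := by ring
      rw [harg, this]
    have hnn : 0 ≤ (b - (a + m) + m - 1) / m := Int.ediv_nonneg (by omega) (by omega)
    have hcount : ((b - a + m - 1) / m).toNat = ((b - (a + m) + m - 1) / m).toNat + 1 := by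
      omega
    rw [if_pos hab, if_pos h2, hcount, List.range_succ_eq_map, List.map_cons, List.map_map]
    refine congrArg₂ List.cons (by simp) ?_
    refine List.map_congr_left ?_
    intro k _
    simp only [Function.comp_apply]
    push_cast
    ring
  · have hq1 : ((b - a + m - 1) / m).toNat = 1 := by
      have harg : b - a + m - 1 = (b - a - 1) + 1 * m := by ring
      have hdiv := Int.add_mul_ediv_right (b - a - 1) 1 (by omega : m ≠ 0)
      have : (b - a + m - 1) / m = 1 := by
        rw [harg, hdiv, Int.ediv_eq_zero_of_lt (by omega) (by omega)]
        norm_num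
      omega
    rw [if_pos hab, if_neg h2, hq1]
    simp [List.range_succ]

-- a fold over enumerate that ignores the index is a fold over the list
theorem pv_foldl_enumerate_snd {α β : Type} (xs : List α) (f : β → α → β) :
    ∀ (s : Int) (init : β),
    (PySem.List.enumerate xs s).foldl (fun acc e => f acc e.2) init = xs.foldl f init := by
  induction xs with
  | nil => intro s init; rfl
  | cons x t ih =>
      intro s init
      rw [PySem.List.enumerate_cons]
      simpa using ih (s + 1) (f init x)

-- enumerate commutes with map
theorem pv_enumerate_map {α β : Type} (f : α → β) (xs : List α) :
    ∀ (s : Int),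
    PySem.List.enumerate (xs.map f) s = (PySem.List.enumerate xs s).map (fun p => (p.1, f p.2)) := by
  induction xs with
  | nil => intro s; rfl
  | cons x t ih =>
      intro s
      rw [List.map_cons, PySem.List.enumerate_cons, PySem.List.enumerate_cons, ih (s + 1),
        List.map_cons]

-- the '.'-position list that A's end_indices comprehension computes
def pvE (ws : List String) : List Int :=
  ((PySem.List.enumerate ws).filter (fun iw => iw.2 == ".")).map Prod.fst

theorem pv_end_indices (ws : List String) :
    (PySem.List.enumerate ws).foldl (fun acc iw => if iw.2 == "." then acc ++ [iw.1] else acc) [] =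
      pvE ws := by
  simpa [pvE] using PySem.List.foldl_append_if (fun iw : Int × String => iw.2 == ".") Prod.fst
    (PySem.List.enumerate ws) []

theorem pv_end_indices_sorted (ws : List String) : (pvE ws).Pairwise (· < ·) := by
  refine List.pairwise_map.mpr ?_
  exact (PySem.List.pairwise_lt_enumerate ws 0).sublist List.filter_sublist

theorem pv_end_indices_nonneg (ws : List String) : ∀ x ∈ pvE ws, 0 ≤ x := by
  intro x hx
  rcases List.mem_map.mp hx with ⟨p, hp, rfl⟩
  rcases (PySem.List.mem_enumerate_iff _ _ _).mp (List.mem_of_mem_filter hp) with ⟨k, hk, rfl⟩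
  simp

-- min of a strictly increasing nonempty list is its head
theorem pv_min_sorted (x : Int) (t : List Int) (h : (x :: t).Pairwise (· < ·)) :
    PySem.List.min? (x :: t) (fun y => y) = some x := by
  rw [PySem.List.min?_id_cons]
  rcases PySem.List.foldl_min_mem t x with he | hm
  · rw [he]
  · exfalso
    have h1 := (PySem.List.foldl_min_le t x).1
    have h2 := (List.pairwise_cons.mp h).1 _ hm
    omega

-- max of a strictly increasing nonempty list is its last element
theorem pv_max_sorted (l : List Int) (h : l.Pairwise (· < ·)) (hne : l ≠ []) :
    PySem.List.max? l (fun y => y) = some (l.getLast hne) := by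
  cases l with
  | nil => exact absurd rfl hne
  | cons x t =>
      rw [PySem.List.max?_id_cons]
      have hmem : t.foldl max x = x ∨ t.foldl max x ∈ t := PySem.List.foldl_max_mem t x
      have hub : x ≤ t.foldl max x ∧ ∀ y ∈ t, y ≤ t.foldl max x := PySem.List.le_foldl_max t x
      have hlast_mem : (x :: t).getLast hne ∈ x :: t := List.getLast_mem hne
      have hlast_ub : ∀ z ∈ x :: t, z ≤ (x :: t).getLast hne := by
        intro z hz
        rcases List.getElem_of_mem hz with ⟨i, hi, rfl⟩
        have hlast : (x :: t).getLast hne = (x :: t)[(x :: t).length - 1] := List.getLast_eq_getElem hne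
        rw [hlast]
        rcases Nat.lt_or_ge i ((x :: t).length - 1) with hlt | hge
        · exact le_of_lt (List.pairwise_iff_getElem.mp h i _ hi (by omega) hlt)
        · have : i = (x :: t).length - 1 := by omega
          subst this; rfl
      have h1 : t.foldl max x ≤ (x :: t).getLast hne := by
        rcases hmem with he | hm
        · rw [he]; exact hlast_ub x (by simp)
        · exact hlast_ub _ (List.mem_cons_of_mem _ hm)
      have h2 : (x :: t).getLast hne ≤ t.foldl max x := by
        rcases List.mem_cons.mp hlast_mem with he | hm
        · rw [he]; exact hub.1
        · exact hub.2 _ hm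
      rw [congrArg some (le_antisymm h1 h2)]

-- A's inner per-cluster append loop is B's filterMap comprehension
theorem pv_cluster_loop (g : Int → Int → List Int) (P : Int → Prop) [DecidablePred P]
    (cluster : List (List Int)) :
    ∀ acc : List (List Int),
    cluster.foldl (fun nc p =>
        match p with
        | [x, y] => if P x then nc ++ [g x y] else nc
        | _ => nc) acc =
      acc ++ cluster.filterMap (fun p =>
        match p with
        | [x, y] => if P x then some (g x y) else none
        | _ => none) := by
  induction cluster with
  | nil => intro acc; simp
  | cons p t ih =>
      intro acc
      match p with
      | [] => simpa using ih acc
      | [x] => simpa using ih acc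
      | [x, y] =>
          by_cases h : P x <;> simp [List.foldl_cons, h, ih]
      | x :: y :: z :: r => simpa using ih acc

-- A's filter_clusters builds exactly the cluster list of B's _make_chunk when start ≤ fin
theorem pv_filter_clusters_eq (clusters : List (List (List Int))) (start fin : Int)
    (h : start ≤ fin) :
    pvFilterClusters clusters start fin =
      (pvMakeChunk "" [] clusters [] 0 start fin).2.2.1 := by
  unfold pvFilterClusters pvMakeChunk
  simp only
  refine PySem.List.foldl_congr_mem _ _ _ _ ?_
  intro acc cluster _
  have hlen : max (fin - start) 0 = fin - start := by omega
  simp only [hlen]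
  rw [pv_cluster_loop (fun x y => [min (x - start) (fin - start - 1), min (y - start) (fin - start - 1)])
    (fun x => start ≤ x ∧ x < fin) cluster []]
  simp

-- the direct chunk boundaries (what both programs compute per chunk)
def pvStartOf (E : List Int) (cs : Int) : Int :=
  if cs = 0 then 0 else PySem.List.pyGetD E (cs - 1) 0 + 1
def pvFinOf (E : List Int) (m cs : Int) : Int :=
  PySem.List.pyGetD E (min (cs + m) (E.length : Int) - 1) 0 + 1

-- A's per-example loop body (proof helper; definitionally A's fold step)
def pvBodyA (m : Int)
    (examples_out : List (String × List String × List (List (List Int)) × List String))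
    (ex : String × List String × List (List (List Int)) × List String) :
    List (String × List String × List (List (List Int)) × List String) :=
  let doc_key := ex.1
  let input_words := ex.2.1
  let clusters := ex.2.2.1
  let speakers := ex.2.2.2
  let end_indices : List Int := (PySem.List.enumerate input_words).foldl
    (fun acc iw => if iw.2 == "." then acc ++ [iw.1] else acc) []
  let start_indices : List Int := [-1] ++ PySem.List.slice end_indices none (some (-1))
  let indices := start_indices.zip end_indices
  let split_indices := (PySem.List.pyRange 0 (indices.length : Int) m).map
    (fun i => PySem.List.slice indices (some i) (some (i + m)))
  (PySem.List.enumerate split_indices).foldl (fun out isplit =>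
    let starts := isplit.2.map Prod.fst
    let ends := isplit.2.map Prod.snd
    let start := (PySem.List.min? starts (fun x => x)).getD 0 + 1
    let fin := (PySem.List.max? ends (fun x => x)).getD 0 + 1
    out ++ [(pvDocKey doc_key isplit.1 start fin,
             PySem.List.slice input_words (some start) (some fin),
             pvFilterClusters clusters start fin,
             PySem.List.slice speakers (some start) (some fin))]) examples_out

-- B's per-example loop body (proof helper; definitionally B's fold step)
def pvBodyB (m : Int)
    (examples_out : List (String × List String × List (List (List Int)) × List String))
    (ex : String × List String × List (List (List Int)) × List String) :
    List (String × List String × List (List (List Int)) × List String) :=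
  let dk := ex.1
  let ws := ex.2.1
  let cl := ex.2.2.1
  let sp := ex.2.2.2
  let st := (PySem.List.enumerate ws).foldl
    (fun (st : Int × Int × Int × Int × List (String × List String × List (List (List Int)) × List String)) iw =>
      if iw.2 == "." then
        let count := st.2.1 + 1
        let endv := iw.1 + 1
        if count = m then
          (endv, 0, st.2.2.1 + 1, endv,
           st.2.2.2.2 ++ [pvMakeChunk dk ws cl sp st.2.2.1 st.1 endv])
        else (st.1, count, st.2.2.1, endv, st.2.2.2.2)
      else st) (0, 0, 0, 0, examples_out)
  if st.2.1 > 0 then st.2.2.2.2 ++ [pvMakeChunk dk ws cl sp st.2.2.1 st.1 st.2.2.2.1]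
  else st.2.2.2.2

theorem pv_A_eq_fold (examples : List (String × List String × List (List (List Int)) × List String))
    (m : Int) : split2sentences examples m = examples.foldl (pvBodyA m) [] := by
  exact pv_foldl_enumerate_snd examples (pvBodyA m) 0 []

theorem pv_B_eq_fold (examples : List (String × List String × List (List (List Int)) × List String))
    (m : Int) : split2sentences_alt examples m
      = if m < 1 then [] else examples.foldl (pvBodyB m) [] := rfl

-- the streaming step of B at a period position (definitionally B's inner branch)
def pvSStep (dk : String) (ws : List String) (cl : List (List (List Int))) (sp : List String)
    (m : Int)
    (st : Int × Int × Int × Int × List (String × List String × List (List (List Int)) × List String))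
    (i : Int) : Int × Int × Int × Int × List (String × List String × List (List (List Int)) × List String) :=
  let count := st.2.1 + 1
  let endv := i + 1
  if count = m then
    (endv, 0, st.2.2.1 + 1, endv, st.2.2.2.2 ++ [pvMakeChunk dk ws cl sp st.2.2.1 st.1 endv])
  else (st.1, count, st.2.2.1, endv, st.2.2.2.2)

-- B's fold over enumerate(words), which acts only on '.', is a fold over the period positions
theorem pv_foldl_enum_filter {β : Type} (g : β → Int → β) (ws : List String) :
    ∀ (s : Int) (st : β),
    (PySem.List.enumerate ws s).foldl (fun st iw => if iw.2 == "." then g st iw.1 else st) st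
      = (((PySem.List.enumerate ws s).filter (fun iw => iw.2 == ".")).map Prod.fst).foldl g st := by
  induction ws with
  | nil => intro s st; rfl
  | cons w t ih =>
      intro s st
      rw [PySem.List.enumerate_cons]
      simp only [List.foldl_cons, List.filter_cons]
      by_cases hb : (w == ".") = true
      · rw [if_pos hb, if_pos hb, List.map_cons, List.foldl_cons]
        exact ih (s + 1) (g st s)
      · rw [if_neg hb, if_neg hb]
        exact ih (s + 1) st

-- index a ≥ 1 of the shifted start list is index a-1 of the period list
theorem pv_getElem_firsts (ei : List Int) (a : Nat) (h1 : 1 ≤ a) (h2 : a < ei.length) :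
    ((-1 : Int) :: ei.dropLast)[a]'(by simp [List.length_dropLast]; omega) = ei[a - 1]'(by omega) := by
  obtain ⟨c, rfl⟩ : ∃ c, a = c + 1 := ⟨a - 1, by omega⟩
  simp [List.getElem_cons_succ, List.getElem_dropLast]

-- the per-chunk start/end arithmetic: head/last of A's chunk vs direct indexing
theorem pv_chunk_bounds (ei : List Int) (hpw : ei.Pairwise (· < ·)) (hnn : ∀ x ∈ ei, 0 ≤ x)
    (m i : Int) (hm : 0 < m) (hi0 : 0 ≤ i) (hin : i < (ei.length : Int)) :
    ((PySem.List.min? ((PySem.List.slice (((-1 : Int) :: ei.dropLast).zip ei) (some i) (some (i + m))).map Prod.fst) (fun x => x)).getD 0 + 1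
        = pvStartOf ei i) ∧
    ((PySem.List.max? ((PySem.List.slice (((-1 : Int) :: ei.dropLast).zip ei) (some i) (some (i + m))).map Prod.snd) (fun x => x)).getD 0 + 1
        = pvFinOf ei m i) ∧
    (pvStartOf ei i ≤ pvFinOf ei m i) := by
  unfold pvStartOf pvFinOf
  obtain ⟨a, rfl⟩ : ∃ a : ℕ, i = (a : Int) := ⟨i.toNat, (Int.toNat_of_nonneg hi0).symm⟩
  have han : a < ei.length := by exact_mod_cast hin
  have hn1 : 1 ≤ ei.length := by omega
  set b := ((a : Int) + m).toNat - a with hb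
  have hb1 : 1 ≤ b := by omega
  set firsts := (-1 : Int) :: ei.dropLast with hf
  have hflen : firsts.length = ei.length := by
    simp only [hf, List.length_cons, List.length_dropLast]; omega
  have hmapfst : (firsts.zip ei).map Prod.fst = firsts := List.map_fst_zip (by omega)
  have hmapsnd : (firsts.zip ei).map Prod.snd = ei := List.map_snd_zip (by omega)
  have hslice : ∀ xs : List (Int × Int),
      PySem.List.slice xs (some (a : Int)) (some ((a : Int) + m)) = (xs.drop a).take b := by
    intro xs
    rw [PySem.List.slice_toNat xs (by omega) (by omega)]
    simp only [Int.toNat_natCast]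
    rw [← hb]
  have hstarts : (PySem.List.slice (firsts.zip ei) (some (a : Int)) (some ((a : Int) + m))).map Prod.fst
      = (firsts.drop a).take b := by
    rw [hslice, List.map_take, List.map_drop, hmapfst]
  have hends : (PySem.List.slice (firsts.zip ei) (some (a : Int)) (some ((a : Int) + m))).map Prod.snd
      = (ei.drop a).take b := by
    rw [hslice, List.map_take, List.map_drop, hmapsnd]
  have hpwf : firsts.Pairwise (· < ·) := by
    rw [hf, List.pairwise_cons]
    refine ⟨fun y hy => ?_, hpw.sublist (List.dropLast_sublist ei)⟩
    have := hnn y ((List.dropLast_sublist ei).mem hy)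
    omega
  have hha : a < firsts.length := by omega
  have hcons : (firsts.drop a).take b = firsts[a] :: (firsts.drop (a + 1)).take (b - 1) := by
    obtain ⟨b', hb'⟩ : ∃ b', b = b' + 1 := ⟨b - 1, by omega⟩
    rw [hb', List.drop_eq_getElem_cons hha, List.take_succ_cons]
    simp
  have hmin : PySem.List.min? ((firsts.drop a).take b) (fun x => x) = some firsts[a] := by
    rw [hcons]
    refine pv_min_sorted _ _ ?_
    rw [← hcons]
    exact hpwf.sublist ((List.take_sublist _ _).trans (List.drop_sublist _ _))
  have hendlen : ((ei.drop a).take b).length = min b (ei.length - a) := by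
    simp [List.length_take, List.length_drop]
  have hne : (ei.drop a).take b ≠ [] := List.ne_nil_of_length_pos (by omega)
  have hmax : PySem.List.max? ((ei.drop a).take b) (fun x => x)
      = some (((ei.drop a).take b).getLast hne) :=
    pv_max_sorted _ (hpw.sublist ((List.take_sublist _ _).trans (List.drop_sublist _ _))) hne
  have hidx : a + (min b (ei.length - a) - 1) < ei.length := by omega
  have hlast : ((ei.drop a).take b).getLast hne = ei[a + (min b (ei.length - a) - 1)]'hidx := by
    rw [List.getLast_eq_getElem]
    simp only [List.getElem_take, List.getElem_drop, hendlen]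
  have hBend : PySem.List.pyGetD ei (min ((a : Int) + m) ((ei.length : Nat) : Int) - 1) 0
      = ei[a + (min b (ei.length - a) - 1)]'hidx := by
    rw [PySem.List.pyGetD_eq_getElem ei 0 (by omega) (by omega)]
    simp only [show (min ((a : Int) + m) ((ei.length : Nat) : Int) - 1).toNat
      = a + (min b (ei.length - a) - 1) from by omega]
  refine ⟨?_, ?_, ?_⟩
  · -- start
    rw [hstarts, hmin, Option.getD_some]
    by_cases hi : (a : Int) = 0
    · rw [if_pos hi]
      have ha0 : a = 0 := by omega
      simp [ha0, hf]
    · rw [if_neg hi]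
      have ha1 : 1 ≤ a := by omega
      have hgf : firsts[a]'hha = ei[a - 1]'(by omega) := by
        simp only [hf]
        exact pv_getElem_firsts ei a ha1 han
      rw [hgf, PySem.List.pyGetD_eq_getElem ei 0 (by omega) (by omega)]
      simp only [show ((a : Int) - 1).toNat = a - 1 from by omega]
  · -- end
    rw [hends, hmax, Option.getD_some, hlast, hBend]
  · -- start ≤ end
    rw [hBend]
    have hnn' := hnn _ (List.getElem_mem hidx)
    by_cases hi : (a : Int) = 0
    · rw [if_pos hi]; omega
    · rw [if_neg hi]
      have ha1 : 1 ≤ a := by omega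
      rw [PySem.List.pyGetD_eq_getElem ei 0 (by omega) (by omega)]
      have hlt : ei[((a : Int) - 1).toNat]'(by omega) < ei[a + (min b (ei.length - a) - 1)]'hidx :=
        List.pairwise_iff_getElem.mp hpw _ _ (by omega) (by omega) (by omega)
      omega

-- the chunk list both programs produce, consumed max_sentences periods at a time
def pvChunks (dk : String) (ws : List String) (cl : List (List (List Int))) (sp : List String)
    (mn : Nat) (j s0 : Int) (E : List Int) :
    List (String × List String × List (List (List Int)) × List String) :=
  match E with
  | [] => []
  | e :: rest =>
      let c := (e :: rest).take (max mn 1)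
      let fin := c.getLast?.getD 0 + 1
      pvMakeChunk dk ws cl sp j s0 fin ::
        pvChunks dk ws cl sp mn (j + 1) fin ((e :: rest).drop (max mn 1))
termination_by E.length
decreasing_by simp [List.length_drop]

-- A's per-document output in direct-index chunk form
theorem pv_bodyA_chunks (m : Int) (hm : 0 < m)
    (acc : List (String × List String × List (List (List Int)) × List String))
    (ex : String × List String × List (List (List Int)) × List String) :
    pvBodyA m acc ex = acc ++
      (PySem.List.enumerate (PySem.List.pyRange 0 (((pvE ex.2.1).length : Nat) : Int) m)).map
        (fun p => pvMakeChunk ex.1 ex.2.1 ex.2.2.1 ex.2.2.2 p.1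
          (pvStartOf (pvE ex.2.1) p.2) (pvFinOf (pvE ex.2.1) m p.2)) := by
  simp only [pvBodyA, pv_end_indices, PySem.List.slice_to_neg_one, List.singleton_append]
  set E : List Int := pvE ex.2.1 with hE
  have hpw : E.Pairwise (· < ·) := pv_end_indices_sorted ex.2.1
  have hnn : ∀ x ∈ E, 0 ≤ x := pv_end_indices_nonneg ex.2.1
  have hzlen : (((-1 : Int) :: E.dropLast).zip E).length = E.length := by
    simp only [List.length_zip, List.length_cons, List.length_dropLast]
    omega
  rw [hzlen, pv_enumerate_map, List.foldl_map]
  rw [PySem.List.foldl_append_singleton_eq_map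
    (fun p : Int × Int =>
      (pvDocKey ex.1 p.1 ((PySem.List.min? ((PySem.List.slice (((-1 : Int) :: E.dropLast).zip E) (some p.2) (some (p.2 + m))).map Prod.fst) (fun x => x)).getD 0 + 1) ((PySem.List.max? ((PySem.List.slice (((-1 : Int) :: E.dropLast).zip E) (some p.2) (some (p.2 + m))).map Prod.snd) (fun x => x)).getD 0 + 1),
       PySem.List.slice ex.2.1 (some ((PySem.List.min? ((PySem.List.slice (((-1 : Int) :: E.dropLast).zip E) (some p.2) (some (p.2 + m))).map Prod.fst) (fun x => x)).getD 0 + 1)) (some ((PySem.List.max? ((PySem.List.slice (((-1 : Int) :: E.dropLast).zip E) (some p.2) (some (p.2 + m))).map Prod.snd) (fun x => x)).getD 0 + 1)),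
       pvFilterClusters ex.2.2.1 ((PySem.List.min? ((PySem.List.slice (((-1 : Int) :: E.dropLast).zip E) (some p.2) (some (p.2 + m))).map Prod.fst) (fun x => x)).getD 0 + 1) ((PySem.List.max? ((PySem.List.slice (((-1 : Int) :: E.dropLast).zip E) (some p.2) (some (p.2 + m))).map Prod.snd) (fun x => x)).getD 0 + 1),
       PySem.List.slice ex.2.2.2 (some ((PySem.List.min? ((PySem.List.slice (((-1 : Int) :: E.dropLast).zip E) (some p.2) (some (p.2 + m))).map Prod.fst) (fun x => x)).getD 0 + 1)) (some ((PySem.List.max? ((PySem.List.slice (((-1 : Int) :: E.dropLast).zip E) (some p.2) (some (p.2 + m))).map Prod.snd) (fun x => x)).getD 0 + 1))))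
    _ acc]
  congr 1
  refine List.map_congr_left ?_
  intro p hp
  rcases (PySem.List.mem_enumerate_iff _ _ _).mp hp with ⟨k, hk, rfl⟩
  simp only
  have hmem : (PySem.List.pyRange 0 ((E.length : Nat) : Int) m)[k] ∈ PySem.List.pyRange 0 ((E.length : Nat) : Int) m :=
    List.getElem_mem hk
  rcases (PySem.List.mem_pyRange_iff_of_pos hm _).mp hmem with ⟨h0, h1, -⟩
  obtain ⟨hstart, hend, hle⟩ := pv_chunk_bounds E hpw hnn m _ hm h0 h1
  rw [hstart, hend, pv_filter_clusters_eq _ _ _ hle]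
  simp [pvMakeChunk]

-- the direct-index chunk map is pvChunks
theorem pv_mapeq (dk : String) (ws : List String) (cl : List (List (List Int))) (sp : List String)
    (E : List Int) (m : Int) (hm : 1 ≤ m) :
    ∀ (k : Nat) (a : Int), 0 ≤ a → a ≤ (E.length : Int) → ((E.length : Int) - a).toNat = k →
    ∀ (j : Int),
    (PySem.List.enumerate (PySem.List.pyRange a ((E.length : Nat) : Int) m) j).map
        (fun p => pvMakeChunk dk ws cl sp p.1 (pvStartOf E p.2) (pvFinOf E m p.2))
      = pvChunks dk ws cl sp m.toNat j (pvStartOf E a) (E.drop a.toNat) := by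
  intro k
  induction k using Nat.strong_induction_on with
  | _ k ih =>
    intro a ha0 han hk j
    by_cases hlt : a < (E.length : Int)
    · -- a chunk starts at a
      obtain ⟨e, rest, hD⟩ : ∃ e rest, E.drop a.toNat = e :: rest := by
        cases hD : E.drop a.toNat with
        | nil =>
            exfalso
            have := congrArg List.length hD
            simp [List.length_drop] at this
            omega
        | cons e rest => exact ⟨e, rest, rfl⟩
      have hmn1 : max m.toNat 1 = m.toNat := by omega
      have hdl : (E.drop a.toNat).length = E.length - a.toNat := by simp
      -- fin of the first chunk
      set c := (E.drop a.toNat).take m.toNat with hc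
      have hclen : c.length = min m.toNat (E.length - a.toNat) := by
        simp [hc]
      have hcn : c ≠ [] := by
        refine List.ne_nil_of_length_pos ?_
        omega
      have hidx : a.toNat + (min m.toNat (E.length - a.toNat) - 1) < E.length := by omega
      have hlastc : c.getLast?.getD 0 = E[a.toNat + (min m.toNat (E.length - a.toNat) - 1)]'hidx := by
        rw [List.getLast?_eq_some_getLast hcn, Option.getD_some, List.getLast_eq_getElem]
        simp only [hc, List.getElem_take, List.getElem_drop, List.length_take, List.length_drop]
      have hfin : pvFinOf E m a = c.getLast?.getD 0 + 1 := by
        unfold pvFinOf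
        rw [hlastc, PySem.List.pyGetD_eq_getElem E 0 (by omega) (by omega)]
        congr 1
        simp only [show (min (a + m) ((E.length : Nat) : Int) - 1).toNat
          = a.toNat + (min m.toNat (E.length - a.toNat) - 1) from by omega]
      -- unfold both sides one step
      rw [pv_pyRange_pos_cons a _ m (by omega) (by exact_mod_cast hlt),
        PySem.List.enumerate_cons, List.map_cons, hD]
      rw [pvChunks.eq_def]
      simp only [hmn1, ← hD]
      rw [← hc, ← hfin]
      congr 1
      -- the tail
      have hdrop : (E.drop a.toNat).drop m.toNat = E.drop (a + m).toNat := by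
        rw [List.drop_drop]
        congr 1
        omega
      by_cases h2 : a + m < (E.length : Int)
      · have := ih ((E.length : Int) - (a + m)).toNat (by omega) (a + m) (by omega) (by omega)
          rfl (j + 1)
        rw [this, hdrop]
        congr 1
        -- pvStartOf E (a+m) = fin of the first chunk
        unfold pvStartOf
        rw [if_neg (by omega), hfin, hlastc,
          PySem.List.pyGetD_eq_getElem E 0 (by omega) (by omega)]
        congr 2
        simp only [show (a + m - 1).toNat = a.toNat + (min m.toNat (E.length - a.toNat) - 1)
          from by omega]
      · rw [pv_pyRange_pos_nil _ _ _ (by omega) (by omega), hdrop,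
          List.drop_eq_nil_of_le (by omega)]
        simp [PySem.List.enumerate_nil, pvChunks.eq_def]
    · -- a = length: no chunks left
      have : a = (E.length : Int) := by omega
      subst this
      rw [pv_pyRange_pos_nil _ _ _ (by omega) (by omega),
        List.drop_eq_nil_of_le (by omega)]
      simp [PySem.List.enumerate_nil, pvChunks.eq_def]

-- the streaming fold while the count stays below max_sentences
theorem pv_noemit (dk : String) (ws : List String) (cl : List (List (List Int))) (sp : List String)
    (m : Int) (c : List Int) :
    ∀ (start cnt j e : Int)
      (o : List (String × List String × List (List (List Int)) × List String)),
      0 ≤ cnt → cnt + (c.length : Int) < m →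
    c.foldl (pvSStep dk ws cl sp m) (start, cnt, j, e, o)
      = (start, cnt + (c.length : Int), j, (c.getLast?.map (· + 1)).getD e, o) := by
  induction c with
  | nil => intro start cnt j e o h0 h1; simp
  | cons x t ih =>
      intro start cnt j e o h0 h1
      have hne : ¬ (cnt + 1 = m) := by
        have : (0 : Int) ≤ t.length := by positivity
        simp only [List.length_cons] at h1
        push_cast at h1
        omega
      rw [List.foldl_cons]
      show t.foldl (pvSStep dk ws cl sp m) (pvSStep dk ws cl sp m (start, cnt, j, e, o) x) = _
      rw [show pvSStep dk ws cl sp m (start, cnt, j, e, o) x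
          = (start, cnt + 1, j, x + 1, o) from by simp [pvSStep, hne]]
      rw [ih start (cnt + 1) j (x + 1) o (by omega)
        (by simp only [List.length_cons] at h1; push_cast at h1 ⊢; omega)]
      cases t with
      | nil => simp
      | cons y u =>
          simp only [List.length_cons, List.getLast?_cons_cons]
          refine congrArg (fun z => (start, z, j, ((y :: u).getLast?.map (· + 1)).getD (x + 1), o)) ?_
          push_cast
          ring

-- the streaming fold across one full chunk of max_sentences periods
theorem pv_emit (dk : String) (ws : List String) (cl : List (List (List Int))) (sp : List String)
    (m : Int) (hm : 1 ≤ m) (c : List Int) (hc : (c.length : Int) = m) :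
    ∀ (start j e : Int)
      (o : List (String × List String × List (List (List Int)) × List String)),
    c.foldl (pvSStep dk ws cl sp m) (start, 0, j, e, o)
      = (c.getLast?.getD 0 + 1, 0, j + 1, c.getLast?.getD 0 + 1,
         o ++ [pvMakeChunk dk ws cl sp j start (c.getLast?.getD 0 + 1)]) := by
  intro start j e o
  have hcn : c ≠ [] := by
    intro h; subst h; simp at hc; omega
  have hsplit : c = c.dropLast ++ [c.getLast hcn] := (List.dropLast_append_getLast hcn).symm
  rw [show c.foldl (pvSStep dk ws cl sp m) (start, 0, j, e, o)
      = (c.dropLast ++ [c.getLast hcn]).foldl (pvSStep dk ws cl sp m) (start, 0, j, e, o)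
    from by rw [← hsplit]]
  rw [List.foldl_append]
  have hlen1 : 0 < c.length := List.length_pos_of_ne_nil hcn
  have hdl : (c.dropLast.length : Int) = m - 1 := by
    rw [List.length_dropLast]
    omega
  rw [pv_noemit dk ws cl sp m c.dropLast start 0 j e o le_rfl (by omega)]
  rw [List.foldl_cons, List.foldl_nil]
  have hcount : (0 : Int) + (c.dropLast.length : Int) + 1 = m := by omega
  rw [show pvSStep dk ws cl sp m
        (start, 0 + (c.dropLast.length : Int), j, (c.dropLast.getLast?.map (· + 1)).getD e, o)
        (c.getLast hcn)
      = (c.getLast hcn + 1, 0, j + 1, c.getLast hcn + 1,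
         o ++ [pvMakeChunk dk ws cl sp j start (c.getLast hcn + 1)]) from by
    have hcount2 : ((c.length - 1 : Nat) : Int) + 1 = m := by omega
    simp [pvSStep, hcount2]]
  rw [List.getLast?_eq_some_getLast hcn, Option.getD_some]

-- the whole streaming pass produces pvChunks
theorem pv_stream (dk : String) (ws : List String) (cl : List (List (List Int))) (sp : List String)
    (m : Int) (hm : 1 ≤ m) :
    ∀ (k : Nat) (E : List Int), E.length = k → ∀ (s0 j e : Int)
      (o : List (String × List String × List (List (List Int)) × List String)),
    (let st := E.foldl (pvSStep dk ws cl sp m) (s0, 0, j, e, o);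
     if st.2.1 > 0 then st.2.2.2.2 ++ [pvMakeChunk dk ws cl sp st.2.2.1 st.1 st.2.2.2.1]
     else st.2.2.2.2)
      = o ++ pvChunks dk ws cl sp m.toNat j s0 E := by
  intro k
  induction k using Nat.strong_induction_on with
  | _ k ih =>
    intro E hE s0 j e o
    cases E with
    | nil => simp [pvChunks.eq_def]
    | cons x rest =>
        have hmn1 : max m.toNat 1 = m.toNat := by omega
        by_cases hlen : ((x :: rest).length : Int) < m
        · -- partial last chunk
          rw [show (x :: rest).foldl (pvSStep dk ws cl sp m) (s0, 0, j, e, o)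
              = (s0, 0 + ((x :: rest).length : Int), j,
                 ((x :: rest).getLast?.map (· + 1)).getD e, o) from
            pv_noemit dk ws cl sp m (x :: rest) s0 0 j e o le_rfl (by omega)]
          have hpos : (0 : Int) + ((x :: rest).length : Int) > 0 := by
            simp only [List.length_cons]
            push_cast
            omega
          simp only [hpos, if_pos]
          have htake : (x :: rest).take (max m.toNat 1) = x :: rest := by
            rw [hmn1]
            refine List.take_of_length_le ?_
            simp only [List.length_cons] at hlen ⊢
            omega
          have hdropn : (x :: rest).drop (max m.toNat 1) = [] := by
            rw [hmn1]
            refine List.drop_eq_nil_of_le ?_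
            simp only [List.length_cons] at hlen ⊢
            omega
          rw [pvChunks.eq_def]
          simp only [htake, hdropn, pvChunks.eq_def]
          have hgl : ((x :: rest).getLast?.map (· + 1)).getD e
              = (x :: rest).getLast?.getD 0 + 1 := by
            rw [List.getLast?_eq_some_getLast (show x :: rest ≠ [] by simp), Option.map_some, Option.getD_some,
              Option.getD_some]
          rw [hgl]
        · -- one full chunk, then recurse
          set c := (x :: rest).take m.toNat with hc
          set r := (x :: rest).drop m.toNat with hr
          have hclen : (c.length : Int) = m := by
            simp only [hc, List.length_take]
            simp only [List.length_cons] at hlen ⊢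
            push_cast [Nat.cast_min]
            omega
          have hsplit : x :: rest = c ++ r := (List.take_append_drop _ _).symm
          rw [show (x :: rest).foldl (pvSStep dk ws cl sp m) (s0, 0, j, e, o)
              = r.foldl (pvSStep dk ws cl sp m)
                  (c.foldl (pvSStep dk ws cl sp m) (s0, 0, j, e, o)) from by
            rw [hsplit] at hE ⊢  -- also fine to only rewrite goal
            rw [List.foldl_append]]
          rw [pv_emit dk ws cl sp m hm c hclen s0 j e o]
          have hrlen : r.length < k := by
            have := congrArg List.length hsplit
            simp only [List.length_append] at this
            have hc1 : 1 ≤ c.length := by omega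
            omega
          rw [ih r.length (by omega) r rfl (c.getLast?.getD 0 + 1) (j + 1)
            (c.getLast?.getD 0 + 1) (o ++ [pvMakeChunk dk ws cl sp j s0 (c.getLast?.getD 0 + 1)])]
          conv_rhs => rw [pvChunks.eq_def]
          simp only [hmn1, ← hc, ← hr, List.append_assoc, List.singleton_append]

-- B's per-document loop produces pvChunks
theorem pv_bodyB_chunks (m : Int) (hm : 1 ≤ m)
    (acc : List (String × List String × List (List (List Int)) × List String))
    (ex : String × List String × List (List (List Int)) × List String) :
    pvBodyB m acc ex = acc ++ pvChunks ex.1 ex.2.1 ex.2.2.1 ex.2.2.2 m.toNat 0 0 (pvE ex.2.1) := by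
  have h := pv_foldl_enum_filter (pvSStep ex.1 ex.2.1 ex.2.2.1 ex.2.2.2 m) ex.2.1 0
    ((0 : Int), (0 : Int), (0 : Int), (0 : Int), acc)
  have h2 := pv_stream ex.1 ex.2.1 ex.2.2.1 ex.2.2.2 m hm (pvE ex.2.1).length (pvE ex.2.1) rfl
    0 0 0 acc
  show (fun st : Int × Int × Int × Int × List (String × List String × List (List (List Int)) × List String) =>
      if st.2.1 > 0 then st.2.2.2.2 ++ [pvMakeChunk ex.1 ex.2.1 ex.2.2.1 ex.2.2.2 st.2.2.1 st.1 st.2.2.2.1]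
      else st.2.2.2.2)
    ((PySem.List.enumerate ex.2.1).foldl
      (fun (st : Int × Int × Int × Int × List (String × List String × List (List (List Int)) × List String)) (iw : Int × String) =>
        if iw.2 == "." then pvSStep ex.1 ex.2.1 ex.2.2.1 ex.2.2.2 m st iw.1 else st)
      (0, 0, 0, 0, acc)) = _
  rw [h]
  exact h2

-- a fold whose body ignores its element is the identity
theorem pv_foldl_id {α β : Type} (l : List α) (f : β → α → β) (h : ∀ acc x, f acc x = acc) :
    ∀ init, l.foldl f init = init := by
  induction l with
  | nil => intro init; rfl
  | cons x t ih => intro init; rw [List.foldl_cons, h]; exact ih init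

-- per document, A's loop body equals B's (for max_sentences ≥ 1)
theorem pv_per_doc (m : Int) (hm : 1 ≤ m)
    (acc : List (String × List String × List (List (List Int)) × List String))
    (ex : String × List String × List (List (List Int)) × List String) :
    pvBodyA m acc ex = pvBodyB m acc ex := by
  rw [pv_bodyA_chunks m (by omega) acc ex, pv_bodyB_chunks m hm acc ex]
  congr 1
  have := pv_mapeq ex.1 ex.2.1 ex.2.2.1 ex.2.2.2 (pvE ex.2.1) m hm
    ((pvE ex.2.1).length) 0 le_rfl (by positivity) (by simp) 0
  simpa [pvStartOf] using this

-- ===== VERDICT (by name: the statement is the Claim_ definition above) =====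
theorem split2sentences_spec : Claim_equal_split2sentences := by
  intro examples m _ hpre
  show split2sentences examples m = split2sentences_alt examples m
  rw [pv_A_eq_fold, pv_B_eq_fold]
  by_cases hm1 : m < 1
  · rw [if_pos hm1]
    rcases hpre.1 with hnil | hne
    · subst hnil; rfl
    · have hmneg : m < 0 := by
        rcases lt_trichotomy m 0 with h | h | h
        · exact h
        · exact absurd h hne
        · omega
      refine pv_foldl_id examples (pvBodyA m) ?_ []
      intro acc ex
      simp only [pvBodyA]
      rw [pv_pyRange_neg_nil _ _ hmneg (by positivity)]
      simp [PySem.List.enumerate_nil]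
  · rw [if_neg hm1]
    exact PySem.List.foldl_congr_mem _ _ _ _
      (fun acc x _ => pv_per_doc m (by omega) acc x)
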